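-- pv_equiv track=rewrite | github.com/xz278/data_analysis | utils.py | cons_count
-- ===== SOURCE A (Python) =====
-- def cons_count(l, v=1):
--     """
--     Compute the number of most recent and highest
--     consecutive occurance of a given value.
--
--     Parameters:
--     -----------
--     l: list
--         List/Array-like data.
--
--     v: type of element in l
--         Value to consider.
--
--     Returns:
--     c: int
--         Current consecutive.
--
--     m: int
--         Maximum consecutive.
--     """
--     # current
--     p = len(l)
--     c = 0
--     while (p - 1 >= 0) and (l[p - 1] == v):
--         c += 1
--         p -= 1
--
--     # maximum
--     m = -1
--     curr_m = 0
--     p = len(l)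
--     while p - 1 >= 0:
--         if l[p - 1] == v:
--             curr_m += 1
--         else:
--             if curr_m > m:
--                 m = curr_m
--             curr_m = 0
--         if (p - 1 == 0) and (curr_m > m):
--             m = curr_m
--         p -= 1
--     return c, m
-- ===== SOURCE B (Python) =====
-- def cons_count(l, v=1):
--     if not l:
--         return 0, -1
--     cur = 0
--     m = 0
--     for x in l:
--         cur = cur + 1 if x == v else 0
--         if cur > m:
--             m = cur
--     return cur, m
-- ===== Notes on version B (the rewrite author's own statement) =====
-- stated objective: simpler
-- what changed: Replaces A's two backward index-driven while loops (one for the trailing run, one for the maximum run with an end-of-loop special case) by an empty-list guard plus a single forward pass maintaining the current-run and maximum-run counters together.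
import Mathlib
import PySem

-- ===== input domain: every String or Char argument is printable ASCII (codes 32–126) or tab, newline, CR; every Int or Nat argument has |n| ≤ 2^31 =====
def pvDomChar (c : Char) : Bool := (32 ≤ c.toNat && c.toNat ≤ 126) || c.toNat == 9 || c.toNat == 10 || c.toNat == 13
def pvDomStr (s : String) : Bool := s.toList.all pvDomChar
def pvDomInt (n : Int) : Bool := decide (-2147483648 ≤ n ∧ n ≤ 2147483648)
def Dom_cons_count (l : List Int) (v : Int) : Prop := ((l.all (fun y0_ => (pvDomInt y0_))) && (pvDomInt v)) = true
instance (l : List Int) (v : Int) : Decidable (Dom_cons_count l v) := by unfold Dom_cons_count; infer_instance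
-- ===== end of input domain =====

-- B replaces A's two backward index-driven while loops by an empty-list guard plus one
-- forward pass maintaining the current-run and maximum-run counters together (simpler).

-- ===== PORT A =====
-- first while loop of A: p counts down from len(l); c counts the trailing run of v
def ccLoop1 (l : List Int) (v : Int) : Nat → Int → Int
  | 0, c => c
  | p+1, c =>
    if PySem.List.pyGet? l (p : Int) = some v then ccLoop1 l v p (c + 1) else c

-- second while loop of A: p counts down; state (curr_m, m), with the (p-1 == 0) final check
def ccLoop2 (l : List Int) (v : Int) : Nat → Int → Int → Int
  | 0, _, m => m
  | p+1, curr, m =>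
    let cm := if PySem.List.pyGet? l (p : Int) = some v then (curr + 1, m)
              else (0, if curr > m then curr else m)
    let m2 := if p = 0 ∧ cm.1 > cm.2 then cm.1 else cm.2
    ccLoop2 l v p cm.1 m2

def cons_count (l : List Int) (v : Int) : Int × Int :=
  (ccLoop1 l v l.length 0, ccLoop2 l v l.length 0 (-1))

-- ===== PORT B =====
-- B's loop body: cur = cur + 1 if x == v else 0; if cur > m: m = cur
def stepB (v : Int) (s : Int × Int) (x : Int) : Int × Int :=
  let cur := if x = v then s.1 + 1 else 0
  (cur, if cur > s.2 then cur else s.2)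

def cons_count_alt (l : List Int) (v : Int) : Int × Int :=
  if l = [] then (0, -1)
  else l.foldl (stepB v) (0, 0)

-- ===== PRECONDITION & SPEC =====
def Spec_cons_count (l : List Int) (v : Int) (out : Int × Int) : Prop := out = cons_count_alt l v
instance (l : List Int) (v : Int) (out : Int × Int) : Decidable (Spec_cons_count l v out) := by unfold Spec_cons_count; infer_instance

-- ===== CLAIM (what is proved, stated in full; the proofs are below) =====
def Claim_equal_cons_count : Prop := ∀ (l : List Int) (v : Int), Dom_cons_count l v → Spec_cons_count l v (cons_count l v)

-- ===== LEMMAS AND PROOFS =====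

-- length of the leading run of v
def leadI (v : Int) : List Int → Int
  | [] => 0
  | x :: xs => if x = v then leadI v xs + 1 else 0

-- length of the maximum run of v
def mrunI (v : Int) : List Int → Int
  | [] => 0
  | x :: xs => max (leadI v (x :: xs)) (mrunI v xs)

lemma leadI_nonneg (v : Int) : ∀ r : List Int, 0 ≤ leadI v r
  | [] => le_refl 0
  | x :: xs => by
    have := leadI_nonneg v xs
    simp only [leadI]
    split_ifs <;> omega

lemma leadI_le_mrunI (v : Int) : ∀ r : List Int, leadI v r ≤ mrunI v r
  | [] => le_refl 0
  | x :: xs => by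
    rw [mrunI]
    exact le_max_left _ _

lemma mrunI_nonneg (v : Int) : ∀ r : List Int, 0 ≤ mrunI v r
  | [] => le_refl 0
  | x :: xs => by
    have := mrunI_nonneg v xs
    rw [mrunI]
    omega

lemma take_succ_reverse (l : List Int) (p : Nat) (h : p < l.length) :
    (l.take (p+1)).reverse = l[p] :: (l.take p).reverse := by
  rw [List.take_add_one]
  simp [List.getElem?_eq_getElem h]

lemma ccLoop1_eq (l : List Int) (v : Int) :
    ∀ (p : Nat) (c : Int), p ≤ l.length →
      ccLoop1 l v p c = c + leadI v ((l.take p).reverse)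
  | 0, c, _ => by simp [ccLoop1, leadI]
  | p+1, c, h => by
    have hp : p < l.length := by omega
    rw [ccLoop1, PySem.List.pyGet?_natCast, List.getElem?_eq_getElem hp,
        take_succ_reverse l p hp]
    by_cases hx : l[p] = v
    · rw [if_pos (by rw [hx]), ccLoop1_eq l v p (c+1) (by omega)]
      simp only [leadI, if_pos hx]
      ring
    · rw [if_neg (by simpa using hx)]
      simp [leadI, hx]

lemma ccLoop2_eq (l : List Int) (v : Int) :
    ∀ (p : Nat) (curr m : Int), p ≤ l.length → 0 ≤ curr →
      ccLoop2 l v p curr m =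
        if p = 0 then m
        else max m (max (curr + leadI v ((l.take p).reverse))
                        (mrunI v ((l.take p).reverse)))
  | 0, curr, m, _, _ => by simp [ccLoop2]
  | p+1, curr, m, h, hc => by
    have hp : p < l.length := by omega
    have hL := leadI_nonneg v ((l.take p).reverse)
    have hM := mrunI_nonneg v ((l.take p).reverse)
    have hLM := leadI_le_mrunI v ((l.take p).reverse)
    rw [ccLoop2, PySem.List.pyGet?_natCast, List.getElem?_eq_getElem hp]
    rw [if_neg (by omega : ¬ p + 1 = 0), take_succ_reverse l p hp]
    by_cases hx : l[p] = v
    · rw [if_pos (by rw [hx])]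
      rw [ccLoop2_eq l v p (curr+1) _ (by omega) (by omega)]
      simp only [leadI, mrunI, if_pos hx]
      rcases Nat.eq_zero_or_pos p with hq | hq
      · subst hq
        simp only [List.take_zero, List.reverse_nil, leadI, mrunI]
        simp only [if_true, true_and]
        split_ifs <;> omega
      · rw [if_neg (by omega : ¬ p = 0),
            if_neg (fun hcc => absurd hcc.1 (by omega : ¬ p = 0))]
        omega
    · rw [if_neg (by simpa using hx)]
      rw [ccLoop2_eq l v p 0 _ (by omega) le_rfl]
      simp only [leadI, mrunI, if_neg hx]
      rcases Nat.eq_zero_or_pos p with hq | hq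
      · subst hq
        simp only [List.take_zero, List.reverse_nil, leadI, mrunI]
        simp only [if_true, true_and]
        split_ifs <;> omega
      · rw [if_neg (by omega : ¬ p = 0),
            if_neg (fun hcc => absurd hcc.1 (by omega : ¬ p = 0))]
        split_ifs <;> omega

lemma foldB_eq (v : Int) :
    ∀ r : List Int, r.reverse.foldl (stepB v) (0, 0) = (leadI v r, mrunI v r)
  | [] => rfl
  | x :: r => by
    rw [List.reverse_cons, List.foldl_append, foldB_eq v r]
    have hM := mrunI_nonneg v r
    have hL := leadI_nonneg v r
    simp only [List.foldl, stepB, leadI, mrunI]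
    by_cases hx : x = v
    · simp only [if_pos hx, Prod.mk.injEq]
      refine ⟨trivial, ?_⟩
      split_ifs <;> omega
    · simp only [if_neg hx, Prod.mk.injEq]
      refine ⟨trivial, ?_⟩
      split_ifs <;> omega

lemma main_eq (l : List Int) (v : Int) : cons_count l v = cons_count_alt l v := by
  rcases eq_or_ne l [] with rfl | hne
  · simp [cons_count, cons_count_alt, ccLoop1, ccLoop2]
  · have hfold : l.foldl (stepB v) (0, 0) = (leadI v l.reverse, mrunI v l.reverse) := by
      have h := foldB_eq v l.reverse
      rwa [List.reverse_reverse] at h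
    have h1 := ccLoop1_eq l v l.length 0 le_rfl
    have h2 := ccLoop2_eq l v l.length 0 (-1) le_rfl le_rfl
    rw [List.take_length] at h1 h2
    have hlen : l.length ≠ 0 := by simpa using hne
    rw [cons_count, cons_count_alt, if_neg hne, hfold, h1, h2, if_neg hlen]
    have hL := leadI_nonneg v l.reverse
    have hLM := leadI_le_mrunI v l.reverse
    have hM := mrunI_nonneg v l.reverse
    refine Prod.ext ?_ ?_
    · omega
    · simp only
      omega

-- ===== VERDICT (by name: the statement is the Claim_ definition above) =====
theorem cons_count_spec : Claim_equal_cons_count := by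
  intro l v _
  exact main_eq l v
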